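-- pv_equiv track=rewrite | github.com/aflaag/pokemon-icat | pokemon.py | evaluate_generation_from_index
-- ===== SOURCE A (Python) =====
-- def evaluate_generation_from_index(index):
--     ranges = {
--         (1, 151): 1,
--         (152, 251): 2,
--         (252, 386): 3,
--         (387, 493): 4,
--         (494, 649): 5,
--         (650, 721): 6,
--         (722, 809): 7,
--         (810, 898): 8,
--     }
--
--     for k in ranges.keys():
--         if k[0] <= index <= k[1]:
--             return ranges[k]
-- ===== SOURCE B (Python) =====
-- import bisect
--
-- _BOUNDS = [151, 251, 386, 493, 649, 721, 809, 898]
--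
-- def evaluate_generation_from_index(index):
--     if index < 1:
--         return None
--     pos = bisect.bisect_left(_BOUNDS, index)
--     if pos == len(_BOUNDS):
--         return None
--     return pos + 1
-- ===== Notes on version B (the rewrite author's own statement) =====
-- stated objective: idiomatic
-- what changed: Replaces the linear scan over eight (lo,hi)->gen range entries with a binary search (bisect_left) into a sorted list of generation upper bounds.
import Mathlib
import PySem

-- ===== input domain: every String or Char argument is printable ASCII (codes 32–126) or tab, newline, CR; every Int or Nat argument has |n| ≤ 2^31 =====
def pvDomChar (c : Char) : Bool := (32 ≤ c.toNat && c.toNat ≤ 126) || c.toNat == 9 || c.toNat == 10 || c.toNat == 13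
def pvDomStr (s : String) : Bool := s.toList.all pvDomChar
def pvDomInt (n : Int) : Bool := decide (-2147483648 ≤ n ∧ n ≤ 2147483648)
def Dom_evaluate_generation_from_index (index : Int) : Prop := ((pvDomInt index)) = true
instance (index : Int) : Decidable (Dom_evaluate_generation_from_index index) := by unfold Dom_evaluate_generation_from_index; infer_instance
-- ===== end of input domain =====

-- ===== PORT A =====
-- ranges dict ported as an association list in insertion order; the loop over keys
-- returns the value of the first range containing index, else none.
def pvRangesA : List ((Int × Int) × Int) :=
  [((1, 151), 1), ((152, 251), 2), ((252, 386), 3), ((387, 493), 4),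
   ((494, 649), 5), ((650, 721), 6), ((722, 809), 7), ((810, 898), 8)]

def pvLoopA (index : Int) : List ((Int × Int) × Int) → Option Int
  | [] => none
  | ((a, b), g) :: rest => if a ≤ index ∧ index ≤ b then some g else pvLoopA index rest

def evaluate_generation_from_index (index : Int) : Option Int :=
  pvLoopA index pvRangesA

-- ===== PORT B =====
def pvBounds : List Int := [151, 251, 386, 493, 649, 721, 809, 898]

-- bisect.bisect_left on a list of Ints: the standard lo/hi binary search.
-- The extra fuel argument (started at xs.length, ample since the range halves
-- each step) only makes the loop total; it never runs out before lo = hi.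
def pvBisectLeftAux (xs : List Int) (x : Int) : Nat → Nat → Nat → Nat
  | 0, lo, _ => lo
  | fuel + 1, lo, hi =>
    if lo < hi then
      if xs.getD ((lo + hi) / 2) 0 < x then pvBisectLeftAux xs x fuel ((lo + hi) / 2 + 1) hi
      else pvBisectLeftAux xs x fuel lo ((lo + hi) / 2)
    else lo

def pvBisectLeft (xs : List Int) (x : Int) : Nat :=
  pvBisectLeftAux xs x xs.length 0 xs.length

def evaluate_generation_from_index_alt (index : Int) : Option Int :=
  if index < 1 then none
  else
    let pos := pvBisectLeft pvBounds index
    if pos = pvBounds.length then none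
    else some ((pos : Int) + 1)

-- ===== PRECONDITION & SPEC =====
def Spec_evaluate_generation_from_index (index : Int) (out : Option Int) : Prop := out = evaluate_generation_from_index_alt index
instance (index : Int) (out : Option Int) : Decidable (Spec_evaluate_generation_from_index index out) := by unfold Spec_evaluate_generation_from_index; infer_instance

-- ===== CLAIM (what is proved, stated in full; the proofs are below) =====
def Claim_equal_evaluate_generation_from_index : Prop := ∀ (index : Int), Dom_evaluate_generation_from_index index → Spec_evaluate_generation_from_index index (evaluate_generation_from_index index)

-- ===== LEMMAS AND PROOFS =====

-- the common value of both ports, as one threshold chain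
def pvGenChain (index : Int) : Option Int :=
  if index < 1 then none
  else if index ≤ 151 then some 1 else if index ≤ 251 then some 2
  else if index ≤ 386 then some 3 else if index ≤ 493 then some 4
  else if index ≤ 649 then some 5 else if index ≤ 721 then some 6
  else if index ≤ 809 then some 7 else if index ≤ 898 then some 8 else none

set_option maxHeartbeats 1000000 in
theorem pvLoopA_chain (index : Int) : evaluate_generation_from_index index = pvGenChain index := by
  unfold evaluate_generation_from_index pvGenChain
  simp only [pvRangesA, pvLoopA]
  split_ifs <;> first | rfl | (exfalso; omega)

-- the bisect call on the fixed 8-entry bounds list, evaluated to a threshold chain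
set_option maxRecDepth 8000 in
set_option maxHeartbeats 1000000 in
theorem pvBisectLeft_bounds (x : Int) : pvBisectLeft [151, 251, 386, 493, 649, 721, 809, 898] x =
    if x ≤ 151 then 0 else if x ≤ 251 then 1 else if x ≤ 386 then 2 else if x ≤ 493 then 3
    else if x ≤ 649 then 4 else if x ≤ 721 then 5 else if x ≤ 809 then 6 else if x ≤ 898 then 7
    else 8 := by
  simp [pvBisectLeft, pvBisectLeftAux]
  split_ifs <;> omega

set_option maxHeartbeats 1000000 in
theorem pvAlt_chain (index : Int) :
    evaluate_generation_from_index_alt index = pvGenChain index := by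
  unfold evaluate_generation_from_index_alt pvGenChain
  simp only [pvBounds, List.length, pvBisectLeft_bounds]
  split_ifs <;> first | rfl | (exfalso; omega)

-- ===== VERDICT (by name: the statement is the Claim_ definition above) =====
theorem evaluate_generation_from_index_spec : Claim_equal_evaluate_generation_from_index := by
  intro index _
  unfold Spec_evaluate_generation_from_index
  rw [pvLoopA_chain, pvAlt_chain]
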